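-- pv_equiv track=rewrite | github.com/LatticeLabsAI/ll_toolkit | cadling/cadling/backend/step/topology_builder.py | extract_topology_hierarchy
-- ===== SOURCE A (Python) =====
-- from typing import Dict, List, Set, Tuple, Optional, Any
--
-- def extract_topology_hierarchy(
--     entities: Dict[int, Dict[str, Any]]
-- ) -> Dict[str, List[int]]:
--     """
--     Extract the topological hierarchy (solids -> shells -> faces -> edges -> vertices).
--
--     Args:
--         entities: Dictionary of all entities
--
--     Returns:
--         Dictionary mapping hierarchy levels to entity IDs
--     """
--     hierarchy = {
--         "solids": [],
--         "shells": [],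
--         "faces": [],
--         "edges": [],
--         "vertices": [],
--     }
--
--     for entity_id, entity_data in entities.items():
--         entity_type = entity_data["type"]
--
--         if entity_type in ("MANIFOLD_SOLID_BREP", "BREP_WITH_VOIDS"):
--             hierarchy["solids"].append(entity_id)
--         elif entity_type in ("CLOSED_SHELL", "OPEN_SHELL"):
--             hierarchy["shells"].append(entity_id)
--         elif entity_type in ("FACE_SURFACE", "ADVANCED_FACE", "FACE_BOUND"):
--             hierarchy["faces"].append(entity_id)
--         elif entity_type in ("EDGE_CURVE", "ORIENTED_EDGE"):
--             hierarchy["edges"].append(entity_id)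
--         elif entity_type == "VERTEX_POINT":
--             hierarchy["vertices"].append(entity_id)
--
--     return hierarchy
-- ===== SOURCE B (Python) =====
-- LEVEL_TYPES = [
--     ("solids", {"MANIFOLD_SOLID_BREP", "BREP_WITH_VOIDS"}),
--     ("shells", {"CLOSED_SHELL", "OPEN_SHELL"}),
--     ("faces", {"FACE_SURFACE", "ADVANCED_FACE", "FACE_BOUND"}),
--     ("edges", {"EDGE_CURVE", "ORIENTED_EDGE"}),
--     ("vertices", {"VERTEX_POINT"}),
-- ]
--
-- def extract_topology_hierarchy(entities):
--     # Staged: one filtering pass per hierarchy level; correct because the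
--     # five type sets are pairwise disjoint, so A's cascade order is irrelevant.
--     return {
--         level: [eid for eid, data in entities.items() if data["type"] in types]
--         for level, types in LEVEL_TYPES
--     }
-- ===== Notes on version B (the rewrite author's own statement) =====
-- stated objective: alternative
-- what changed: Replaces A's single accumulator pass with an elif cascade by five staged filtering passes (a dict comprehension over the level table, one filter of the entities per hierarchy level), valid because the five type sets are pairwise disjoint.
import Mathlib
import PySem

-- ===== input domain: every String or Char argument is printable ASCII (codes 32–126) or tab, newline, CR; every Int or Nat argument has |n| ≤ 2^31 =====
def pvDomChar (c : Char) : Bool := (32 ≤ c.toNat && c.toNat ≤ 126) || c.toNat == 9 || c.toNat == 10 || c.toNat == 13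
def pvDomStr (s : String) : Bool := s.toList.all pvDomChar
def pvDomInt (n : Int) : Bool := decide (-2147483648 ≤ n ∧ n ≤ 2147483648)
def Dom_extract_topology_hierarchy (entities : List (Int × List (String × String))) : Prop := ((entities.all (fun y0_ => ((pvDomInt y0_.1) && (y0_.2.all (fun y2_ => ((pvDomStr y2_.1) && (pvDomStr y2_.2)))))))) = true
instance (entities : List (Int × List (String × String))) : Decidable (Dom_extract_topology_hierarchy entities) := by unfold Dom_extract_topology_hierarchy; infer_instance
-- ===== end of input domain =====

-- B replaces A's single accumulator pass with an elif cascade by five staged filtering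
-- passes over a level table (alternative decomposition); return values proven equal under Pre_.

-- entity_data["type"]: Python dict lookup = first match in the association list
-- (KeyError, i.e. no "type" key, is excluded by Pre_; the port returns "" there).
def pvTypeOf (entity_data : List (String × String)) : String :=
  ((entity_data.find? (fun p => p.1 == "type")).map (·.2)).getD ""

-- ===== PORT A =====
-- the loop body of A: branch cascade over the entity type, appending to the dict entry
def pvStepA (d : PySem.Dict String (List Int)) (e : Int × List (String × String)) :
    PySem.Dict String (List Int) :=
  let t := pvTypeOf e.2
  if t == "MANIFOLD_SOLID_BREP" || t == "BREP_WITH_VOIDS" then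
    d.modify "solids" [] (· ++ [e.1])
  else if t == "CLOSED_SHELL" || t == "OPEN_SHELL" then
    d.modify "shells" [] (· ++ [e.1])
  else if t == "FACE_SURFACE" || t == "ADVANCED_FACE" || t == "FACE_BOUND" then
    d.modify "faces" [] (· ++ [e.1])
  else if t == "EDGE_CURVE" || t == "ORIENTED_EDGE" then
    d.modify "edges" [] (· ++ [e.1])
  else if t == "VERTEX_POINT" then
    d.modify "vertices" [] (· ++ [e.1])
  else d

def pvInitHierarchy : PySem.Dict String (List Int) :=
  PySem.Dict.ofList [("solids", []), ("shells", []), ("faces", []), ("edges", []), ("vertices", [])]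

def extract_topology_hierarchy (entities : List (Int × List (String × String))) : List (String × List Int) :=
  (entities.foldl pvStepA pvInitHierarchy).items

-- ===== PORT B =====
-- B's level table (Python sets of type strings, ported as PySem.Set)
def pvTsSolids : PySem.Set String := PySem.Set.ofList ["MANIFOLD_SOLID_BREP", "BREP_WITH_VOIDS"]
def pvTsShells : PySem.Set String := PySem.Set.ofList ["CLOSED_SHELL", "OPEN_SHELL"]
def pvTsFaces : PySem.Set String := PySem.Set.ofList ["FACE_SURFACE", "ADVANCED_FACE", "FACE_BOUND"]
def pvTsEdges : PySem.Set String := PySem.Set.ofList ["EDGE_CURVE", "ORIENTED_EDGE"]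
def pvTsVertices : PySem.Set String := PySem.Set.ofList ["VERTEX_POINT"]

def pvLevelTypes : List (String × PySem.Set String) :=
  [("solids", pvTsSolids), ("shells", pvTsShells), ("faces", pvTsFaces),
   ("edges", pvTsEdges), ("vertices", pvTsVertices)]

-- B: dict comprehension over the level table; each value is one filtering pass over entities
def extract_topology_hierarchy_alt (entities : List (Int × List (String × String))) : List (String × List Int) :=
  pvLevelTypes.map (fun lt =>
    (lt.1, (entities.filter (fun e => PySem.Set.contains lt.2 (pvTypeOf e.2))).map (·.1)))

-- ===== PRECONDITION & SPEC =====
-- Pre_ excludes entities without a "type" key, on which the Python A raises KeyError.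
def Pre_extract_topology_hierarchy (entities : List (Int × List (String × String))) : Prop :=
  ∀ e ∈ entities, (e.2.find? (fun p => p.1 == "type")).isSome = true
instance (entities : List (Int × List (String × String))) : Decidable (Pre_extract_topology_hierarchy entities) := by unfold Pre_extract_topology_hierarchy; infer_instance

def pvWitness_extract_topology_hierarchy : (List (Int × List (String × String))) :=
  [(1, [("type", "CLOSED_SHELL")]), (2, [("type", "VERTEX_POINT")]), (3, [("type", "LINE")])]

def Spec_extract_topology_hierarchy (entities : List (Int × List (String × String))) (out : List (String × List Int)) : Prop := out = extract_topology_hierarchy_alt entities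
instance (entities : List (Int × List (String × String))) (out : List (String × List Int)) : Decidable (Spec_extract_topology_hierarchy entities out) := by unfold Spec_extract_topology_hierarchy; infer_instance

-- ===== CLAIM (what is proved, stated in full; the proofs are below) =====
def Claim_equal_extract_topology_hierarchy : Prop := ∀ (entities : List (Int × List (String × String))), Dom_extract_topology_hierarchy entities → Pre_extract_topology_hierarchy entities → Spec_extract_topology_hierarchy entities (extract_topology_hierarchy entities)

-- ===== LEMMAS AND PROOFS =====

-- one filtering pass of B, as a function of a type set
def pvSel (ts : PySem.Set String) (l : List (Int × List (String × String))) : List Int :=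
  (l.filter (fun e => PySem.Set.contains ts (pvTypeOf e.2))).map (·.1)

-- what one entity contributes to the bucket of type set ts
def pvApp1 (ts : PySem.Set String) (x : Int × List (String × String)) (v : List Int) : List Int :=
  v ++ if PySem.Set.contains ts (pvTypeOf x.2) then [x.1] else []

-- A's cascade on the 5-key dict = appending each entity's contribution to every bucket
lemma pvStepA_mk (a b c d e : List Int) (x : Int × List (String × String)) :
    pvStepA (PySem.Dict.mk [("solids", a), ("shells", b), ("faces", c), ("edges", d), ("vertices", e)]) x
    = PySem.Dict.mk [("solids", pvApp1 pvTsSolids x a), ("shells", pvApp1 pvTsShells x b),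
        ("faces", pvApp1 pvTsFaces x c), ("edges", pvApp1 pvTsEdges x d),
        ("vertices", pvApp1 pvTsVertices x e)] := by
  simp only [pvStepA, pvApp1, pvTsSolids, pvTsShells, pvTsFaces, pvTsEdges, pvTsVertices,
    PySem.Set.contains, PySem.Set.ofList]
  by_cases h1 : pvTypeOf x.2 = "MANIFOLD_SOLID_BREP" <;>
  by_cases h2 : pvTypeOf x.2 = "BREP_WITH_VOIDS" <;>
  by_cases h3 : pvTypeOf x.2 = "CLOSED_SHELL" <;>
  by_cases h4 : pvTypeOf x.2 = "OPEN_SHELL" <;>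
  by_cases h5 : pvTypeOf x.2 = "FACE_SURFACE" <;>
  by_cases h6 : pvTypeOf x.2 = "ADVANCED_FACE" <;>
  by_cases h7 : pvTypeOf x.2 = "FACE_BOUND" <;>
  by_cases h8 : pvTypeOf x.2 = "EDGE_CURVE" <;>
  by_cases h9 : pvTypeOf x.2 = "ORIENTED_EDGE" <;>
  by_cases h10 : pvTypeOf x.2 = "VERTEX_POINT" <;>
  simp_all [PySem.Dict.modify, PySem.Dict.getD, PySem.Dict.get?, PySem.Dict.insert]

lemma pvSel_cons (ts : PySem.Set String) (x : Int × List (String × String))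
    (xs : List (Int × List (String × String))) :
    pvSel ts (x :: xs) = (if PySem.Set.contains ts (pvTypeOf x.2) then [x.1] else []) ++ pvSel ts xs := by
  simp only [pvSel, List.filter]
  split <;> simp_all

-- invariant of A's loop: from the 5-key dict with accumulated values a..e,
-- the fold's items are exactly B's filtered selections appended to each value
lemma pvFoldA_items (l : List (Int × List (String × String))) :
    ∀ a b c d e : List Int,
    (l.foldl pvStepA (PySem.Dict.mk
        [("solids", a), ("shells", b), ("faces", c), ("edges", d), ("vertices", e)])).items
    = [("solids", a ++ pvSel pvTsSolids l), ("shells", b ++ pvSel pvTsShells l),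
       ("faces", c ++ pvSel pvTsFaces l), ("edges", d ++ pvSel pvTsEdges l),
       ("vertices", e ++ pvSel pvTsVertices l)] := by
  induction l with
  | nil => intro a b c d e; simp [pvSel]
  | cons x xs ih =>
    intro a b c d e
    rw [List.foldl_cons, pvStepA_mk, ih]
    simp [pvApp1, pvSel_cons, List.append_assoc]

-- ===== VERDICT (by name: the statement is the Claim_ definition above) =====
theorem extract_topology_hierarchy_spec : Claim_equal_extract_topology_hierarchy := by
  intro entities _ _
  unfold Spec_extract_topology_hierarchy extract_topology_hierarchy extract_topology_hierarchy_alt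
  have : pvInitHierarchy = PySem.Dict.mk
      [("solids", []), ("shells", []), ("faces", []), ("edges", []), ("vertices", [])] := by rfl
  rw [this, pvFoldA_items]
  simp [pvLevelTypes, pvSel]
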